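-- pv_equiv track=rewrite | github.com/DanilVolkov/EGA | EGA_search_parameters.py | breeding
-- ===== SOURCE A (Python) =====
-- from math import floor, inf, factorial
--
-- def breeding(population, method):
--     '''Предпочтение отдается генетически похожим или различным особям'''
--     parents = []
--     while len(population) > 0:
--         max_hamming_distance = -1
--         min_hamming_distance = inf
--         for i in range(len(population)):
--             for j in range(i + 1, len(population)):
--                 hamming_distance = sum(1 for gen in range(len(population[i])) if population[i][gen] != population[j][gen])
--                 if method:  # наиболее близкие особи
--                     if hamming_distance < min_hamming_distance:
--                         min_hamming_distance = hamming_distance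
--                         p1_index, p2_index = i, j
--                 else:  # наиболее различные особи
--                     if hamming_distance > max_hamming_distance:
--                         max_hamming_distance = hamming_distance
--                         p1_index, p2_index = i, j
--
--         parents.append((population[p1_index], population[p2_index]))
--         population.pop(p1_index)
--         population.pop(p2_index - 1)
--
--     return parents
-- ===== SOURCE B (Python) =====
-- def breeding(population, method):
--     '''Предпочтение отдается генетически похожим или различным особям'''
--     # Precompute all pairwise Hamming distances once; each greedy round then
--     # only scans cached distances over the still-alive indices.
--     # (Note: unlike the original, this does not empty the input list in place.)
--     if len(population) % 2:
--         raise ValueError('population size must be even to pair every individual')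
--     n = len(population)
--     dist = [[sum(x != y for x, y in zip(population[i], population[j]))
--              for j in range(n)] for i in range(n)]
--     alive = list(range(n))
--     parents = []
--     while alive:
--         best = None
--         for a in range(len(alive)):
--             for b in range(a + 1, len(alive)):
--                 d = dist[alive[a]][alive[b]]
--                 if best is None or (d < best[0] if method else d > best[0]):
--                     best = (d, a, b)
--         _, a, b = best
--         parents.append((population[alive[a]], population[alive[b]]))
--         del alive[a]
--         del alive[b - 1]
--     return parents
-- ===== Notes on version B (the rewrite author's own statement) =====
-- stated objective: faster
-- what changed: Hamming distances are computed once into an n x n matrix and each greedy selection round scans cached distances over an index list instead of recomputing every pairwise distance from the genomes.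
import Mathlib
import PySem

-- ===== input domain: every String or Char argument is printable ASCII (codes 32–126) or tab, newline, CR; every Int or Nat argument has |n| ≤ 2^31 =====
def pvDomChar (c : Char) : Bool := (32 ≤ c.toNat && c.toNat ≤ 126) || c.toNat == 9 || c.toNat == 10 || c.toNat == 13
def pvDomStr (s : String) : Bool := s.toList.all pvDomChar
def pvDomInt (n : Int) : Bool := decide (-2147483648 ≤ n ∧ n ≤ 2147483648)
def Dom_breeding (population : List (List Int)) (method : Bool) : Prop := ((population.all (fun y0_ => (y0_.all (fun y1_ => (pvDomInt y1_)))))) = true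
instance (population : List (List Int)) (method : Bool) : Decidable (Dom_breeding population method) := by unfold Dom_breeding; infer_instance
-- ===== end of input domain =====

-- B precomputes the n×n Hamming-distance matrix once and each greedy round scans cached
-- distances over a list of alive indices (A recomputes every distance from the genomes each
-- round). Equivalence is about the RETURN value: Python A empties its input list in place, B does not.


-- ===== PORT A =====
-- sum(1 for gen in range(len(population[i])) if population[i][gen] != population[j][gen]);
-- the getD defaults are never hit inside Pre_ (there gen < len of both rows), where Python would raise IndexError.
def distA (r s : List Int) : Nat :=
  (List.range r.length).countP (fun g => r.getD g 0 != s.getD g 0)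

-- the running (min|max)_hamming_distance together with p1_index, p2_index; 'none' is the initial
-- state (inf / -1 with unset indices): the first comparison always succeeds in Python (d < inf, d > -1).
def stepA (method : Bool) (d i j : Nat) (acc : Option (Nat × Nat × Nat)) : Option (Nat × Nat × Nat) :=
  match acc with
  | none => some (d, i, j)
  | some (m, p, q) =>
      if (if method then d < m else m < d) then some (d, i, j) else some (m, p, q)

-- the double 'for i in range(len): for j in range(i+1, len)' scan of one while-round
def scanA (pop : List (List Int)) (method : Bool) : Option (Nat × Nat × Nat) :=
  (List.range pop.length).foldl
    (fun acc i =>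
      (List.range' (i + 1) (pop.length - (i + 1))).foldl
        (fun acc j => stepA method (distA (pop.getD i []) (pop.getD j [])) i j acc) acc)
    none

-- the while-loop; fuel = initial length bounds the rounds (each round removes two elements).
-- scanA = none means Python's p1_index/p2_index are unset or stale and Python raises
-- (UnboundLocalError / IndexError); that happens only outside Pre_, the port returns [] there.
def loopA (method : Bool) : Nat → List (List Int) → List (List Int × List Int)
  | 0, _ => []
  | fuel + 1, pop =>
    if pop.isEmpty then []
    else
      match scanA pop method with
      | none => []
      | some (_, i, j) =>
          -- population[p1_index], population[p2_index]; then pop(p1_index), pop(p2_index-1):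
          -- valid indices (i < j < len from the scan), where Python's pop is eraseIdx
          (pop.getD i [], pop.getD j []) :: loopA method fuel ((pop.eraseIdx i).eraseIdx (j - 1))

def breeding (population : List (List Int)) (method : Bool) : List (List Int × List Int) :=
  loopA method population.length population

-- ===== PORT B =====
-- sum(x != y for x, y in zip(population[i], population[j]))
def distB (r s : List Int) : Nat :=
  (r.zip s).countP (fun p => p.1 != p.2)

-- better = (lambda d, m: d < m) if method else (lambda d, m: d > m)
def better (method : Bool) (d m : Nat) : Bool := if method then d < m else m < d

-- best[0] (only read when best is not None: Lean's || is as lazy as Python's 'or')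
def bestFst (best : Option (Nat × Nat × Nat)) : Nat := (best.getD (0, 0, 0)).1

-- 'if best is None or better(d, best[0]): best = (d, a, b)'
def stepB (method : Bool) (d a b : Nat) (best : Option (Nat × Nat × Nat)) : Option (Nat × Nat × Nat) :=
  if best.isNone || better method d (bestFst best) then some (d, a, b) else best

-- the scan over positions of the alive index list, reading cached matrix entries
-- (dist[alive[a]][alive[b]]; the getD defaults are never hit: alive entries index the matrix)
def scanB (matrix : List (List Nat)) (method : Bool) (alive : List Nat) : Option (Nat × Nat × Nat) :=
  (List.range alive.length).foldl
    (fun best a =>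
      (List.range' (a + 1) (alive.length - (a + 1))).foldl
        (fun best b =>
          stepB method ((matrix.getD (alive.getD a 0) []).getD (alive.getD b 0) 0) a b best) best)
    none

-- the while-loop over the alive list; scanB = none only if fewer than two alive indices
-- remain, which the evenness check at the top of B rules out while alive is non-empty
def loopB (matrix : List (List Nat)) (pop : List (List Int)) (method : Bool) :
    Nat → List Nat → List (List Int × List Int)
  | 0, _ => []
  | fuel + 1, alive =>
    if alive.isEmpty then []
    else
      match scanB matrix method alive with
      | none => []
      | some (_, a, b) =>
          (pop.getD (alive.getD a 0) [], pop.getD (alive.getD b 0) []) ::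
            loopB matrix pop method fuel ((alive.eraseIdx a).eraseIdx (b - 1))

def breeding_alt (population : List (List Int)) (method : Bool) : List (List Int × List Int) :=
  -- "if len(population) % 2: raise ValueError(...)": B returns no value on odd sizes
  -- (outside Pre_); the port returns [] there
  if population.length % 2 = 1 then []
  else loopB (population.map (fun r => population.map (fun s => distB r s))) population method
    population.length (List.range population.length)

-- ===== PRECONDITION & SPEC =====
-- Exactly the inputs where Python A returns: an even number of individuals (on odd, the final
-- singleton round reads unset/stale p1_index/p2_index and raises) whose row lengths never
-- decrease (a longer row before a shorter one raises IndexError in the distance sum).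
def Pre_breeding (population : List (List Int)) (method : Bool) : Prop :=
  population.length % 2 = 0 ∧ (population.map List.length).Pairwise (· ≤ ·)
instance (population : List (List Int)) (method : Bool) : Decidable (Pre_breeding population method) := by unfold Pre_breeding; infer_instance

def pvWitness_breeding : List (List Int) × Bool := ([[0, 0], [0, 1], [1, 1], [1, 0]], true)

def Spec_breeding (population : List (List Int)) (method : Bool) (out : List (List Int × List Int)) : Prop := out = breeding_alt population method
instance (population : List (List Int)) (method : Bool) (out : List (List Int × List Int)) : Decidable (Spec_breeding population method out) := by unfold Spec_breeding; infer_instance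

-- ===== CLAIM (what is proved, stated in full; the proofs are below) =====
def Claim_equal_breeding : Prop := ∀ (population : List (List Int)) (method : Bool), Dom_breeding population method → Pre_breeding population method → Spec_breeding population method (breeding population method)
-- ===== LEMMAS AND PROOFS =====

-- A's per-round distance (over range(len(r))) equals B's cached zip distance when r is no longer than s
lemma dist_eq : ∀ (r s : List Int), r.length ≤ s.length → distA r s = distB r s := by
  intro r
  induction r with
  | nil => intro s _; simp [distA, distB]
  | cons a r ih =>
      intro s h
      cases s with
      | nil => simp at h
      | cons b s =>
          have := ih s (by simpa using h)
          simp only [distA, distB, List.length_cons, List.range_succ_eq_map,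
            List.countP_cons, List.countP_map, List.zip_cons_cons,
            List.getD_eq_getElem?_getD] at this ⊢
          simp [Function.comp_def, this]

-- a foldl preserves a predicate preserved by each step
lemma foldl_pres {α β : Type} {P : β → Prop} (g : β → α → β) (l : List α) (init : β)
    (h0 : P init) (h : ∀ acc x, x ∈ l → P acc → P (g acc x)) : P (l.foldl g init) := by
  induction l generalizing init with
  | nil => exact h0
  | cons x xs ih =>
      exact ih _ (h _ _ (List.mem_cons_self) h0) (fun acc y hy => h acc y (List.mem_cons_of_mem _ hy))

-- any pair returned by B's scan consists of positions a < b < alive.length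
lemma scanB_bound (matrix : List (List Nat)) (method : Bool) (alive : List Nat)
    (d a b : Nat) (h : scanB matrix method alive = some (d, a, b)) :
    a < b ∧ b < alive.length := by
  have main : ∀ e a b, scanB matrix method alive = some (e, a, b) → a < b ∧ b < alive.length := by
    unfold scanB
    apply foldl_pres (P := fun acc => ∀ e a b, acc = some (e, a, b) → a < b ∧ b < alive.length)
    · intro e a b hx; cases hx
    · intro acc i hi hP
      apply foldl_pres (P := fun acc => ∀ e a b, acc = some (e, a, b) → a < b ∧ b < alive.length)
      · exact hP
      · intro acc2 j hj hP2 e' a' b' hstep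
        have hi' : i < alive.length := List.mem_range.mp hi
        have hj' : i + 1 ≤ j ∧ j < i + 1 + (alive.length - (i + 1)) := List.mem_range'_1.mp hj
        unfold stepB at hstep
        split at hstep
        · simp only [Option.some.injEq, Prod.mk.injEq] at hstep
          obtain ⟨-, rfl, rfl⟩ := hstep
          omega
        · exact hP2 _ _ _ hstep
  exact main _ _ _ h

-- reading row k of the alive sub-population is reading row alive[k] of the original
lemma getD_map_row (orig : List (List Int)) (alive : List Nat) (k : Nat) (hk : k < alive.length) :
    (alive.map (fun k => orig.getD k [])).getD k [] = orig.getD (alive.getD k 0) [] := by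
  rw [List.getD_eq_getElem _ _ (by simpa using hk), List.getElem_map, List.getD_eq_getElem _ _ hk]

-- A's running-minimum update and B's 'best is None or better' update coincide
lemma step_eq (method : Bool) (d i j : Nat) (acc : Option (Nat × Nat × Nat)) :
    stepA method d i j acc = stepB method d i j acc := by
  cases acc with
  | none => rfl
  | some t =>
      obtain ⟨m, p, q⟩ := t
      by_cases hc : (if method then d < m else m < d)
      · simp [stepA, stepB, better, bestFst, hc]
      · simp [stepA, stepB, better, bestFst, hc]

-- the two scans agree when pop is the alive rows and the matrix caches the distances
lemma scan_eq (orig : List (List Int)) (method : Bool)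
    (hlen : (orig.map List.length).Pairwise (· ≤ ·))
    (alive : List Nat) (hs : alive.Pairwise (· < ·)) (hb : ∀ k ∈ alive, k < orig.length) :
    scanA (alive.map (fun k => orig.getD k [])) method
      = scanB (orig.map (fun r => orig.map (fun s => distB r s))) method alive := by
  unfold scanA scanB
  rw [List.length_map]
  apply PySem.List.foldl_congr_mem
  intro acc i hi
  apply PySem.List.foldl_congr_mem
  intro acc2 j hj
  have hi' : i < alive.length := List.mem_range.mp hi
  have hj12 := List.mem_range'_1.mp hj
  have hj' : j < alive.length := by omega
  have hij : i < j := by omega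
  have hgA : ∀ (k : Nat) (hk : k < alive.length),
      (alive.map (fun k => orig.getD k [])).getD k [] = orig.getD alive[k] [] := by
    intro k hk
    rw [getD_map_row orig alive k hk, List.getD_eq_getElem _ _ hk]
  have hai : alive[i] < orig.length := hb _ (List.getElem_mem hi')
  have haj : alive[j] < orig.length := hb _ (List.getElem_mem hj')
  have hlt : alive[i] < alive[j] := List.pairwise_iff_getElem.mp hs i j hi' hj' hij
  have hrows : (orig[alive[i]]).length ≤ (orig[alive[j]]).length := by
    have := List.pairwise_iff_getElem.mp hlen alive[i] alive[j]
      (by simpa using hai) (by simpa using haj) hlt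
    simpa using this
  have hmat1 : (orig.map (fun r => orig.map (fun s => distB r s))).getD alive[i] []
      = orig.map (fun s => distB orig[alive[i]] s) := by
    rw [List.getD_eq_getElem _ _ (by simpa using hai), List.getElem_map]
  have hmat2 : (orig.map (fun s => distB orig[alive[i]] s)).getD alive[j] 0
      = distB orig[alive[i]] orig[alive[j]] := by
    rw [List.getD_eq_getElem _ _ (by simpa using haj), List.getElem_map]
  have hmat : ((orig.map (fun r => orig.map (fun s => distB r s))).getD (alive.getD i 0) []).getD
      (alive.getD j 0) 0 = distB orig[alive[i]] orig[alive[j]] := by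
    rw [List.getD_eq_getElem alive _ hi', List.getD_eq_getElem alive _ hj', hmat1, hmat2]
  have hd : distA ((alive.map (fun k => orig.getD k [])).getD i [])
      ((alive.map (fun k => orig.getD k [])).getD j [])
      = ((orig.map (fun r => orig.map (fun s => distB r s))).getD (alive.getD i 0) []).getD
        (alive.getD j 0) 0 := by
    rw [hgA i hi', hgA j hj', hmat,
      List.getD_eq_getElem _ _ hai, List.getD_eq_getElem _ _ haj]
    exact dist_eq _ _ hrows
  rw [hd]
  exact step_eq _ _ _ _ _

-- the two while-loops agree round for round
lemma loop_eq (orig : List (List Int)) (method : Bool)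
    (hlen : (orig.map List.length).Pairwise (· ≤ ·)) :
    ∀ (fuel : Nat) (alive : List Nat), alive.Pairwise (· < ·) → (∀ k ∈ alive, k < orig.length) →
      loopA method fuel (alive.map (fun k => orig.getD k []))
        = loopB (orig.map (fun r => orig.map (fun s => distB r s))) orig method fuel alive := by
  intro fuel
  induction fuel with
  | zero => intro alive _ _; rfl
  | succ fuel ih =>
      intro alive hs hb
      simp only [loopA, loopB, List.isEmpty_map]
      by_cases hemp : alive.isEmpty = true
      · simp [hemp]
      · simp only [hemp, Bool.false_eq_true, if_false]
        rw [scan_eq orig method hlen alive hs hb]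
        cases hscan : scanB (orig.map (fun r => orig.map (fun s => distB r s))) method alive with
        | none => rfl
        | some t =>
            obtain ⟨d, a, b⟩ := t
            dsimp only
            obtain ⟨hab, hblen⟩ := scanB_bound _ _ _ _ _ _ hscan
            have halen : a < alive.length := by omega
            congr 1
            · rw [getD_map_row orig alive a halen, getD_map_row orig alive b hblen]
            · rw [List.eraseIdx_map, List.eraseIdx_map]
              exact ih _
                ((hs.sublist (((alive.eraseIdx a).eraseIdx_sublist (b - 1)).trans
                  (alive.eraseIdx_sublist a))))
                (fun k hk => hb k ((((alive.eraseIdx a).eraseIdx_sublist (b - 1)).trans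
                  (alive.eraseIdx_sublist a)).subset hk))

lemma map_range_getD (pop : List (List Int)) :
    (List.range pop.length).map (fun k => pop.getD k []) = pop := by
  apply List.ext_getElem (by simp)
  intro i h1 h2
  simp [List.getD_eq_getElem?_getD, List.getElem?_eq_getElem h2]

-- ===== VERDICT (by name: the statement is the Claim_ definition above) =====
theorem breeding_spec : Claim_equal_breeding := by
  intro population method _ hpre
  unfold Spec_breeding breeding breeding_alt
  rw [if_neg (by have := hpre.1; omega)]
  have h := loop_eq population method hpre.2 population.length (List.range population.length)
    (List.pairwise_lt_range) (fun k hk => List.mem_range.mp hk)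
  rw [map_range_getD] at h
  exact h
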